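-- pv_equiv track=rewrite | github.com/huangzq681/causal-fda | graph_utils.py | conditions
-- ===== SOURCE A (Python) =====
-- def combinations_tuple(iterable, r):
--     """
--     Examples:
--     combinations('ABCD', 2) --> AB AC AD BC BD CD
--     combinations(range(4), 3) --> 012 013 023 123
--
--     Inputs:
--     iterable: sequence to be iterated
--     r: length of each combination
--
--     Returns:
--     tuple of combinations
--     """
--     pool = tuple(iterable)
--     n = len(pool)
--     if r > n:
--         return
--     indices = list(range(r))
--     yield tuple(pool[i] for i in indices)
--     while True:
--         for i in reversed(range(r)):
--             if indices[i] != i + n - r: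
--                 break
--         else:
--             return
--         indices[i] += 1
--         for j in range(i+1, r):
--             indices[j] = indices[j-1] + 1
--         yield tuple(pool[i] for i in indices)
--
-- def product(pool_0, pool_1):
--     result = [[x, y]+[z] for x, y in pool_0 for z in pool_1]
--     for prod in result:
--         yield tuple(prod)
--
-- def conditions(n_nodes):
--     """
--     Generate list of tuples where first entry is first node, second entry is second node of edge, and the third entry of
--     the tuple is the conditional set.
--
--     Inputs:
--     n_nodes: number of variables/nodes in the graph (no maximum)
--
--     Returns:
--     edges_conditions: list of tuples
--
--     """
--     # generate edges of a fully-connected undirected graph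
--     edges = tuple(combinations_tuple(range(n_nodes), 2))
--
--     # generate conditional sets for all edges, including empty set
--     _conditions = []
--     for i in range(n_nodes):
--         _conditions.extend(tuple(combinations_tuple(range(n_nodes), i)))
--
--     edges_cond = list(product(edges, _conditions))
--
--     # delete combinations where one of the two nodes forming the edge are also present in the conditional set
--     edges_conditions = [e_c for e_c in edges_cond if all([e_c[0] not in e_c[2], e_c[1] not in e_c[2]])]
--
--     return edges_conditions
-- ===== SOURCE B (Python) =====
-- def _combos(pool, r):
--     """All r-element combinations of pool, in pool order (recursive)."""
--     if r == 0:
--         return [()]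
--     if len(pool) < r:
--         return []
--     head, rest = pool[0], pool[1:]
--     return [(head,) + c for c in _combos(rest, r - 1)] + _combos(rest, r)
--
--
-- def conditions(n_nodes):
--     res = []
--     for u, v in _combos(list(range(n_nodes)), 2):
--         others = [x for x in range(n_nodes) if x != u and x != v]
--         for i in range(n_nodes):
--             res.extend((u, v, c) for c in _combos(others, i))
--     return res
-- ===== Notes on version B (the rewrite author's own statement) =====
-- stated objective: alternative
-- what changed: A generates edges with an index-stepping combinations generator, builds the full edge-by-subset product and then filters out tuples whose conditioning set contains an endpoint; B uses a structural recursive combinations function and, for each edge, enumerates subsets of the non-endpoint nodes directly, so only valid triples are ever built and the product-then-filter pass disappears.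
import Mathlib
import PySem

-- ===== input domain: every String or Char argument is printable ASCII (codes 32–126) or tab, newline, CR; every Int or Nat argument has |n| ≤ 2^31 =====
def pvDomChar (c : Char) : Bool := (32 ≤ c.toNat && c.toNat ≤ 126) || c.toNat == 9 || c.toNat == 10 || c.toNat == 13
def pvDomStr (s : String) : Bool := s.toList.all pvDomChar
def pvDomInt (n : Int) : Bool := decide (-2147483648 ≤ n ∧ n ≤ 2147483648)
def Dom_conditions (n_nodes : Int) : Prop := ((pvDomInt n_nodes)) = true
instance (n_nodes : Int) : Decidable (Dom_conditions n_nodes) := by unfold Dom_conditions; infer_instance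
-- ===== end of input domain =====

-- B replaces A's build-everything-then-filter pipeline (index-stepping combination generator,
-- full edge×subset product, membership filter) by a recursive combinations function and direct
-- per-edge emission over the non-endpoint nodes (objective: alternative algorithm; only valid
-- triples are ever built, so the filter pass disappears).

-- ===== PORT A =====
-- A's `combinations_tuple` generator: inner for-reversed-break search for the rightmost
-- non-maxed index.
def pvFindBump (indices : List Int) (n r : Nat) : Option Nat :=
  (List.range r).reverse.find? (fun i => indices.getD i 0 ≠ (i : Int) + (n : Int) - (r : Int))

-- `indices[i] += 1` followed by `for j in range(i+1, r): indices[j] = indices[j-1] + 1`.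
def pvBump (indices : List Int) (i r : Nat) : List Int :=
  (List.range' (i + 1) (r - (i + 1))).foldl
    (fun acc j => acc.set j (acc.getD (j - 1) 0 + 1))
    (indices.set i (indices.getD i 0 + 1))

-- `tuple(pool[i] for i in indices)`.
def pvEmit (pool indices : List Int) : List Int :=
  indices.map (fun i => pool.getD i.toNat 0)

-- the `while True` loop; fuel bounds the iteration count (C(n,r) ≤ 2^n), never reached.
def pvCombLoop (fuel : Nat) (pool indices : List Int) (n r : Nat) : List (List Int) :=
  match fuel with
  | 0 => []
  | fuel + 1 =>
    match pvFindBump indices n r with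
    | none => []
    | some i =>
      let ind' := pvBump indices i r
      pvEmit pool ind' :: pvCombLoop fuel pool ind' n r

def combinations_tuple (pool : List Int) (r : Nat) : List (List Int) :=
  let n := pool.length
  if r > n then []
  else
    let ind0 : List Int := (List.range r).map (fun i : Nat => (i : Int))
    pvEmit pool ind0 :: pvCombLoop (2 ^ n) pool ind0 n r

def conditions (n_nodes : Int) : List (Int × Int × List Int) :=
  let rng := PySem.List.pyRange 0 n_nodes 1
  let edges := combinations_tuple rng 2
  let conds := rng.foldl (fun acc i => acc ++ combinations_tuple rng i.toNat) []
  let edges_cond := edges.flatMap (fun e => conds.map (fun z => (e.getD 0 0, e.getD 1 0, z)))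
  edges_cond.filter (fun ec => decide (ec.1 ∉ ec.2.2 ∧ ec.2.1 ∉ ec.2.2))

-- ===== PORT B =====
-- Source B's `_combos`: recursive combinations, pool order preserved.
def pvCombos (pool : List Int) (r : Nat) : List (List Int) :=
  if r = 0 then [[]]
  else if pool.length < r then []
  else
    match pool with
    | [] => []
    | h :: t => (pvCombos t (r - 1)).map (fun c => h :: c) ++ pvCombos t r
termination_by pool.length
decreasing_by all_goals simp

def conditions_alt (n_nodes : Int) : List (Int × Int × List Int) :=
  let rng := PySem.List.pyRange 0 n_nodes 1
  (pvCombos rng 2).flatMap (fun e =>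
    let u := e.getD 0 0
    let v := e.getD 1 0
    let others := rng.filter (fun x => decide (x ≠ u ∧ x ≠ v))
    rng.flatMap (fun i => (pvCombos others i.toNat).map (fun c => (u, v, c))))

-- ===== PRECONDITION & SPEC =====
def Spec_conditions (n_nodes : Int) (out : List (Int × Int × List Int)) : Prop := out = conditions_alt n_nodes
instance (n_nodes : Int) (out : List (Int × Int × List Int)) : Decidable (Spec_conditions n_nodes out) := by unfold Spec_conditions; infer_instance

-- ===== CLAIM (what is proved, stated in full; the proofs are below) =====
def Claim_equal_conditions : Prop := ∀ (n_nodes : Int), Dom_conditions n_nodes → Spec_conditions n_nodes (conditions n_nodes)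

-- ===== LEMMAS AND PROOFS =====

-- proof-side clean combinations recursion (no length guard)
def cmb : List Int → Nat → List (List Int)
  | _, 0 => [[]]
  | [], _ + 1 => []
  | h :: t, r + 1 => (cmb t r).map (fun c => h :: c) ++ cmb t (r + 1)

def natRange (n : Nat) : List Int := (List.range n).map Int.ofNat

def firstC (r : Nat) : List Int := (List.range r).map (fun i : Nat => (i : Int))

def nextC (n r : Nat) (c : List Int) : Option (List Int) :=
  (pvFindBump c n r).map (fun i => pvBump c i r)

def orbit (fuel n r : Nat) (c : List Int) : List (List Int) × Bool :=
  match fuel with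
  | 0 => ([], false)
  | fuel + 1 =>
    match nextC n r c with
    | none => ([], true)
    | some c' =>
      let p := orbit fuel n r c'
      (c' :: p.1, p.2)

theorem cmb_nil_of_short (l : List Int) (r : Nat) (h : l.length < r) : cmb l r = [] := by
  induction l generalizing r with
  | nil => cases r with
    | zero => omega
    | succ s => rfl
  | cons x t ih =>
    cases r with
    | zero => omega
    | succ s =>
      simp only [cmb]
      rw [ih s (by simpa using h), ih (s + 1) (by simp at h ⊢; omega)]
      simp

theorem pvCombos_eq_cmb (l : List Int) (r : Nat) : pvCombos l r = cmb l r := by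
  induction l generalizing r with
  | nil =>
    rw [pvCombos]
    cases r with
    | zero => rfl
    | succ s => simp [cmb]
  | cons x t ih =>
    rw [pvCombos]
    cases r with
    | zero => rfl
    | succ s =>
      by_cases hlen : (x :: t).length < s + 1
      · simp only [hlen, if_true, if_neg (Nat.succ_ne_zero s)]
        exact (cmb_nil_of_short _ _ hlen).symm
      · simp only [hlen, if_false, if_neg (Nat.succ_ne_zero s)]
        simp only [cmb, Nat.add_sub_cancel, ih]

theorem cmb_map (f : Int → Int) (l : List Int) (r : Nat) :
    cmb (l.map f) r = (cmb l r).map (List.map f) := by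
  induction l generalizing r with
  | nil => cases r <;> simp [cmb]
  | cons x t ih =>
    cases r with
    | zero => simp [cmb]
    | succ s => simp [cmb, ih, Function.comp_def]

theorem mem_of_mem_cmb {l : List Int} {r : Nat} {c : List Int} (h : c ∈ cmb l r) :
    ∀ x ∈ c, x ∈ l := by
  induction l generalizing r c with
  | nil =>
    cases r with
    | zero => simp [cmb] at h; simp [h]
    | succ s => simp [cmb] at h
  | cons y t ih =>
    cases r with
    | zero => simp [cmb] at h; simp [h]
    | succ s =>
      simp only [cmb, List.mem_append, List.mem_map] at h
      intro x hx
      rcases h with ⟨c', hc', rfl⟩ | h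
      · rcases List.mem_cons.1 hx with rfl | hx
        · exact List.mem_cons_self
        · exact List.mem_cons_of_mem _ (ih hc' x hx)
      · exact List.mem_cons_of_mem _ (ih h x hx)

theorem filter_cmb (u v : Int) (l : List Int) (r : Nat) :
    (cmb l r).filter (fun z => decide (u ∉ z ∧ v ∉ z))
      = cmb (l.filter (fun x => decide (x ≠ u ∧ x ≠ v))) r := by
  induction l generalizing r with
  | nil => cases r <;> simp [cmb]
  | cons h t ih =>
    cases r with
    | zero => simp [cmb]
    | succ s =>
      by_cases hbad : h = u ∨ h = v
      · have h2 : (decide (h ≠ u ∧ h ≠ v)) = false := by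
          rcases hbad with rfl | rfl <;> simp
        rw [show (h :: t).filter (fun x => decide (x ≠ u ∧ x ≠ v))
              = t.filter (fun x => decide (x ≠ u ∧ x ≠ v)) from by
            rw [List.filter_cons]; simp [h2]]
        simp only [cmb, List.filter_append, List.filter_map]
        rw [show List.filter ((fun z => decide (u ∉ z ∧ v ∉ z)) ∘ fun c => h :: c) (cmb t s) = []
              from List.filter_eq_nil_iff.2
                (fun c _ => by rcases hbad with rfl | rfl <;> simp),
          ih]
        simp
      · simp only [not_or] at hbad
        have hu : u ≠ h := fun e => hbad.1 e.symm
        have hv : v ≠ h := fun e => hbad.2 e.symm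
        rw [show (h :: t).filter (fun x => decide (x ≠ u ∧ x ≠ v))
              = h :: t.filter (fun x => decide (x ≠ u ∧ x ≠ v)) from by
            rw [List.filter_cons]; simp [hbad.1, hbad.2]]
        simp only [cmb, List.filter_append, List.filter_map]
        rw [show List.filter ((fun z => decide (u ∉ z ∧ v ∉ z)) ∘ fun c => h :: c) (cmb t s)
              = List.filter (fun z => decide (u ∉ z ∧ v ∉ z)) (cmb t s) from
            List.filter_congr (fun c _ => by simp [hu, hv]),
          ih s, ih (s + 1)]

theorem length_cmb (l : List Int) (r : Nat) : (cmb l r).length = l.length.choose r := by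
  induction l generalizing r with
  | nil => cases r <;> simp [cmb]
  | cons x t ih =>
    cases r with
    | zero => simp [cmb]
    | succ s => simp [cmb, ih, Nat.choose_succ_succ]

theorem find?_congr_mem {α : Type} (p q : α → Bool) (l : List α)
    (h : ∀ a ∈ l, p a = q a) : l.find? p = l.find? q := by
  induction l with
  | nil => rfl
  | cons x t ih =>
    rw [List.find?_cons, List.find?_cons, h x List.mem_cons_self,
      ih (fun a ha => h a (List.mem_cons_of_mem _ ha))]

theorem set_take_succ (l : List Int) (a : Nat) (v : Int) (h : a < l.length) :
    (l.set a v).take (a + 1) = l.take a ++ [v] := by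
  rw [List.set_eq_take_cons_drop _ h, List.take_append]
  simp [List.length_take, Nat.min_eq_left h.le]

theorem set_getD_self (l : List Int) (a : Nat) (v : Int) (h : a < l.length) :
    (l.set a v).getD a 0 = v := by
  rw [List.getD_eq_getElem _ _ (by simpa using h)]
  simp

theorem consec_map (v : Int) (k : Nat) :
    (List.range (k + 1)).map (fun t : Nat => v + (t : Int))
      = v :: (List.range k).map (fun t : Nat => v + 1 + (t : Int)) := by
  rw [List.range_succ_eq_map, List.map_cons, List.map_map]
  refine congrArg₂ _ (by simp) (List.map_congr_left fun t _ => ?_)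
  simp only [Function.comp_apply]
  push_cast
  ring

theorem foldl_set_consec (k : Nat) : ∀ (a : Nat) (l : List Int), 1 ≤ a → a + k ≤ l.length →
    (List.range' a k).foldl (fun acc j => acc.set j (acc.getD (j - 1) 0 + 1)) l
      = l.take a ++ (List.range k).map (fun t : Nat => l.getD (a - 1) 0 + 1 + (t : Int)) ++ l.drop (a + k) := by
  induction k with
  | zero =>
    intro a l ha hl
    simp
  | succ k ih =>
    intro a l ha hl
    have hal : a < l.length := by omega
    rw [List.range'_succ, List.foldl_cons,
      ih (a + 1) (l.set a (l.getD (a - 1) 0 + 1)) (by omega) (by simp; omega)]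
    rw [set_take_succ _ _ _ hal, List.drop_set_of_lt (hnm := by omega),
      Nat.add_sub_cancel, set_getD_self _ _ _ hal]
    have h4 : (List.range (k + 1)).map (fun t : Nat => l.getD (a - 1) 0 + 1 + (t : Int))
        = (l.getD (a - 1) 0 + 1)
            :: (List.range k).map (fun t : Nat => l.getD (a - 1) 0 + 1 + 1 + (t : Int)) := by
      have := consec_map (l.getD (a - 1) 0 + 1) k
      simpa using this
    rw [h4]
    simp [List.append_assoc]
    omega

theorem bump_closed (c : List Int) (i r : Nat) (hc : c.length = r) (hi : i < r) :
    pvBump c i r = c.take i ++ (List.range (r - i)).map (fun t : Nat => c.getD i 0 + 1 + (t : Int)) := by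
  unfold pvBump
  have hic : i < c.length := by omega
  rw [foldl_set_consec (r - (i + 1)) (i + 1) _ (by omega) (by simp [hc]; omega)]
  rw [set_take_succ _ _ _ hic, Nat.add_sub_cancel, set_getD_self _ _ _ hic]
  have hdrop : ((c.set i (c.getD i 0 + 1)).drop (i + 1 + (r - (i + 1)))) = [] := by
    apply List.drop_eq_nil_of_le
    simp [hc]
    omega
  rw [hdrop]
  have h4 : (List.range (r - i)).map (fun t : Nat => c.getD i 0 + 1 + (t : Int))
      = (c.getD i 0 + 1) :: (List.range (r - (i + 1))).map (fun t : Nat => c.getD i 0 + 1 + 1 + (t : Int)) := by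
    have := consec_map (c.getD i 0 + 1) (r - (i + 1))
    rw [show r - (i + 1) + 1 = r - i by omega] at this
    simpa using this
  rw [h4]
  simp [List.append_assoc]

theorem length_bump (c : List Int) (i r : Nat) (hc : c.length = r) (hi : i < r) :
    (pvBump c i r).length = r := by
  rw [bump_closed c i r hc hi]
  simp [List.length_take, hc]
  omega

theorem findBump_lt {c : List Int} {n r i : Nat} (h : pvFindBump c n r = some i) : i < r := by
  have := List.mem_of_find?_eq_some h
  simp at this
  exact this

theorem length_next {c c' : List Int} {n r : Nat} (h : nextC n r c = some c') (hc : c.length = r) :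
    c'.length = r := by
  unfold nextC at h
  cases hf : pvFindBump c n r with
  | none => rw [hf] at h; simp at h
  | some i =>
    rw [hf] at h
    simp only [Option.map_some, Option.some.injEq] at h
    rw [← h]
    exact length_bump c i r hc (findBump_lt hf)

theorem next_shift (n r : Nat) (d : List Int) (hn : 1 ≤ n) (hd : d.length = r) :
    nextC n r (d.map (· + 1)) = (nextC (n - 1) r d).map (List.map (· + 1)) := by
  unfold nextC
  have hfind : pvFindBump (d.map (· + 1)) n r = pvFindBump d (n - 1) r := by
    unfold pvFindBump
    apply find?_congr_mem
    intro i hi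
    have hir : i < r := by simpa using hi
    have hgd : (d.map (· + 1)).getD i 0 = d.getD i 0 + 1 := by
      rw [List.getD_eq_getElem _ _ (by simp [hd, hir]),
        List.getD_eq_getElem _ _ (by omega)]
      simp
    rw [hgd]
    apply decide_eq_decide.2
    have hcast : ((n - 1 : Nat) : Int) = (n : Int) - 1 := by
      push_cast [Nat.cast_sub hn]
      ring
    rw [hcast]
    omega
  rw [hfind]
  cases hf : pvFindBump d (n - 1) r with
  | none => simp
  | some i =>
    have hir : i < r := findBump_lt hf
    simp only [Option.map_some, Option.some.injEq]
    rw [bump_closed _ i r (by simp [hd]) hir, bump_closed d i r hd hir]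
    have hgd : (d.map (· + 1)).getD i 0 = d.getD i 0 + 1 := by
      rw [List.getD_eq_getElem _ _ (by simp [hd, hir]),
        List.getD_eq_getElem _ _ (by omega)]
      simp
    rw [hgd, List.map_append, List.map_take, List.map_map]
    congr 1
    apply List.map_congr_left
    intro t _
    simp only [Function.comp_apply]
    ring

theorem next_head (n r : Nat) (d : List Int) (hr : 1 ≤ r) (hrn : r ≤ n) (hd : d.length = r - 1) :
    nextC n r (0 :: d.map (· + 1)) =
      match nextC (n - 1) (r - 1) d with
      | some d' => some (0 :: d'.map (· + 1))
      | none => if r < n then some ((firstC r).map (· + 1)) else none := by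
  obtain ⟨s, rfl⟩ : ∃ s, r = s + 1 := ⟨r - 1, by omega⟩
  have hn1 : 1 ≤ n := by omega
  simp only [Nat.add_sub_cancel] at hd ⊢
  have hcast : ((n - 1 : Nat) : Int) = (n : Int) - 1 := by
    push_cast [Nat.cast_sub hn1]; ring
  have hrev : (List.range (s + 1)).reverse
      = ((List.range s).reverse.map Nat.succ) ++ [0] := by
    rw [List.range_succ_eq_map, List.reverse_cons, List.map_reverse]
  have hgd : ∀ j, j < s → (0 :: d.map (· + 1)).getD (j + 1) 0 = d.getD j 0 + 1 := by
    intro j hj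
    show (d.map (· + 1)).getD j 0 = d.getD j 0 + 1
    rw [List.getD_eq_getElem _ _ (by simp [hd, hj]), List.getD_eq_getElem _ _ (by omega)]
    simp
  have hfind : pvFindBump (0 :: d.map (· + 1)) n (s + 1)
      = ((pvFindBump d (n - 1) s).map Nat.succ).or
          (if (n : Int) ≠ (s + 1 : Nat) then some 0 else none) := by
    unfold pvFindBump
    rw [hrev, List.find?_append, List.find?_map]
    congr 1
    · congr 1
      apply find?_congr_mem
      intro j hj
      have hjs : j < s := by simpa using hj
      simp only [Function.comp_apply]
      rw [hgd j hjs]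
      apply decide_eq_decide.2
      rw [hcast]
      push_cast
      omega
    · simp only [List.find?_cons, List.find?_nil]
      by_cases hne : (n : Int) ≠ (s + 1 : Nat)
      · rw [if_pos hne]
        rw [show (decide ((0 :: d.map (· + 1)).getD 0 0 ≠ (0 : Nat) + (n : Int) - ((s+1 : Nat) : Int))) = true
            from by simp; omega]
      · rw [if_neg hne]
        simp only [not_not] at hne
        rw [show (decide ((0 :: d.map (· + 1)).getD 0 0 ≠ (0 : Nat) + (n : Int) - ((s+1 : Nat) : Int))) = false
            from by simp; omega]
  unfold nextC
  rw [hfind]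
  cases hf : pvFindBump d (n - 1) s with
  | some j =>
    have hjs : j < s := findBump_lt hf
    simp only [Option.map_some, Option.or]
    have hb : pvBump (0 :: d.map (· + 1)) (j + 1) (s + 1) = 0 :: (pvBump d j s).map (· + 1) := by
      rw [bump_closed _ (j + 1) (s + 1) (by simp [hd]) (by omega),
        bump_closed d j s hd hjs]
      rw [show (0 :: d.map (· + 1)).take (j + 1) = 0 :: (d.map (· + 1)).take j from rfl,
        hgd j hjs, List.map_append, List.map_take, List.map_map]
      rw [show s + 1 - (j + 1) = s - j by omega]
      simp only [List.cons_append]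
      congr 2
      apply List.map_congr_left
      intro t _
      simp only [Function.comp_apply]
      ring
    simp [hb]
  | none =>
    by_cases hlt : s + 1 < n
    · have hne : (n : Int) ≠ ((s + 1 : Nat) : Int) := by push_cast; omega
      rw [if_pos hne]
      simp only [Option.or]
      have hb : pvBump (0 :: d.map (· + 1)) 0 (s + 1) = (firstC (s + 1)).map (· + 1) := by
        rw [bump_closed _ 0 (s + 1) (by simp [hd]) (by omega)]
        simp only [List.take_zero, List.nil_append, Nat.sub_zero]
        unfold firstC
        rw [List.map_map]
        apply List.map_congr_left
        intro t _
        simp only [Function.comp_apply]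
        show (0 : Int) + 1 + (t : Int) = (t : Int) + 1
        ring
      simp [hb, if_pos hlt]
    · have hne : ¬ ((n : Int) ≠ ((s + 1 : Nat) : Int)) := by push_cast; omega
      rw [if_neg hne]
      simp [Option.or, if_neg hlt]

theorem orbit_shift (fuel n r : Nat) (d : List Int) (hn : 1 ≤ n) (hd : d.length = r) :
    orbit fuel n r (d.map (· + 1))
      = ((orbit fuel (n - 1) r d).1.map (List.map (· + 1)), (orbit fuel (n - 1) r d).2) := by
  induction fuel generalizing d with
  | zero => simp [orbit]
  | succ fuel ih =>
    rw [orbit, orbit, next_shift n r d hn hd]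
    cases hf : nextC (n - 1) r d with
    | none => simp
    | some d' =>
      simp only [Option.map_some]
      have hd' : d'.length = r := length_next hf hd
      simp [ih d' hd']

theorem orbit_head_of_none (fuel n r : Nat) (d : List Int) (T : List (List Int))
    (hr : 1 ≤ r) (hrn : r = n) (hd : d.length = r - 1)
    (horb : orbit fuel (n - 1) (r - 1) d = (T, true)) :
    orbit fuel n r (0 :: d.map (· + 1)) = (T.map (fun x => 0 :: x.map (· + 1)), true) := by
  subst hrn
  induction fuel generalizing d T with
  | zero => simp [orbit] at horb
  | succ fuel ih =>
    rw [orbit] at horb ⊢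
    rw [next_head r r d hr (le_refl r) hd]
    cases hf : nextC (r - 1) (r - 1) d with
    | none =>
      rw [hf] at horb
      simp only at horb
      obtain ⟨rfl, -⟩ : T = [] ∧ True := by
        cases horb; exact ⟨rfl, trivial⟩
      simp
    | some d' =>
      rw [hf] at horb
      simp only at horb
      have hT : T = d' :: (orbit fuel (r - 1) (r - 1) d').1 := (Prod.mk.injEq _ _ _ _ ▸ horb).1.symm
      have hflag : (orbit fuel (r - 1) (r - 1) d').2 = true := (Prod.mk.injEq _ _ _ _ ▸ horb).2
      have hd' : d'.length = r - 1 := length_next hf hd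
      have := ih d' (orbit fuel (r - 1) (r - 1) d').1 hd' (Prod.ext rfl hflag)
      simp only [this, hT]
      simp

theorem orbit_head_of_lt (fuel n r : Nat) (d : List Int) (T : List (List Int))
    (hr : 1 ≤ r) (hrn : r < n) (hd : d.length = r - 1)
    (horb : orbit fuel (n - 1) (r - 1) d = (T, true)) :
    orbit fuel n r (0 :: d.map (· + 1)) =
      (T.map (fun x => 0 :: x.map (· + 1))
         ++ (firstC r).map (· + 1)
            :: (orbit (fuel - T.length - 1) n r ((firstC r).map (· + 1))).1,
       (orbit (fuel - T.length - 1) n r ((firstC r).map (· + 1))).2) := by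
  induction fuel generalizing d T with
  | zero => simp [orbit] at horb
  | succ fuel ih =>
    rw [orbit] at horb
    conv_lhs => rw [orbit]
    rw [next_head n r d hr (le_of_lt hrn) hd]
    cases hf : nextC (n - 1) (r - 1) d with
    | none =>
      rw [hf] at horb
      simp only at horb
      obtain ⟨rfl, -⟩ : T = [] ∧ True := by
        cases horb; exact ⟨rfl, trivial⟩
      simp only [if_pos hrn, List.map_nil, List.length_nil, List.nil_append,
        Nat.sub_zero, Nat.add_sub_cancel]
    | some d' =>
      rw [hf] at horb
      simp only at horb
      have hT : T = d' :: (orbit fuel (n - 1) (r - 1) d').1 := (Prod.mk.injEq _ _ _ _ ▸ horb).1.symm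
      have hflag : (orbit fuel (n - 1) (r - 1) d').2 = true := (Prod.mk.injEq _ _ _ _ ▸ horb).2
      have hd' : d'.length = r - 1 := length_next hf hd
      have hrec := ih d' (orbit fuel (n - 1) (r - 1) d').1 hd' (Prod.ext rfl hflag)
      simp only [hrec, hT]
      have hlen : fuel + 1 - ((d' :: (orbit fuel (n - 1) (r - 1) d').1).length) - 1
          = fuel - (orbit fuel (n - 1) (r - 1) d').1.length - 1 := by
        simp only [List.length_cons]
        omega
      rw [hlen]
      simp

theorem natRange_succ_shift (m : Nat) :
    natRange (m + 1) = 0 :: (natRange m).map (· + 1) := by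
  simp only [natRange, List.range_succ_eq_map, List.map_cons, List.map_map]
  congr 1

theorem firstC_succ (s : Nat) : firstC (s + 1) = 0 :: (firstC s).map (· + 1) := by
  simp only [firstC, List.range_succ_eq_map, List.map_cons, List.map_map]
  congr 1

theorem cmb_zero (l : List Int) : cmb l 0 = [[]] := by cases l <;> rfl

theorem cmb_head (n r : Nat) (h : r ≤ n) :
    cmb (natRange n) r = firstC r :: (cmb (natRange n) r).tail := by
  induction n generalizing r with
  | zero =>
    obtain rfl : r = 0 := by omega
    simp [cmb_zero, firstC]
  | succ m ih =>
    cases r with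
    | zero => simp [cmb_zero, firstC]
    | succ s =>
      rw [natRange_succ_shift m]
      show cmb (0 :: (natRange m).map (· + 1)) (s + 1) = _
      rw [show cmb (0 :: (natRange m).map (· + 1)) (s + 1)
            = (cmb ((natRange m).map (· + 1)) s).map (fun c => 0 :: c)
                ++ cmb ((natRange m).map (· + 1)) (s + 1) from rfl]
      rw [cmb_map, ih s (by omega)]
      simp only [List.map_cons, List.cons_append, firstC_succ]
      rfl

theorem nextC_zero (n : Nat) (c : List Int) : nextC n 0 c = none := by
  simp [nextC, pvFindBump]

theorem orbit_first (n : Nat) : ∀ (r fuel : Nat), r ≤ n → n.choose r ≤ fuel →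
    orbit fuel n r (firstC r) = ((cmb (natRange n) r).tail, true) := by
  induction n with
  | zero =>
    intro r fuel hr hf
    obtain rfl : r = 0 := by omega
    obtain ⟨f, rfl⟩ : ∃ f, fuel = f + 1 := ⟨fuel - 1, by simp at hf; omega⟩
    rw [orbit, nextC_zero]
    simp [cmb_zero]
  | succ m ih =>
    intro r fuel hr hf
    cases r with
    | zero =>
      obtain ⟨f, rfl⟩ : ∃ f, fuel = f + 1 := ⟨fuel - 1, by simp at hf; omega⟩
      rw [orbit, nextC_zero]
      simp [cmb_zero]
    | succ s =>
      have hsm : s ≤ m := by omega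
      have hchoose : (m + 1).choose (s + 1) = m.choose s + m.choose (s + 1) :=
        Nat.choose_succ_succ m s
      have hpos : 1 ≤ m.choose s := Nat.choose_pos hsm
      -- inner orbit for the (r-1)-combinations of the shrunken pool
      have hinner := ih s fuel hsm (by omega)
      set T := (cmb (natRange m) s).tail with hT
      have hTlen : T.length = m.choose s - 1 := by
        have hl := length_cmb (natRange m) s
        rw [hT, List.length_tail, hl]
        simp [natRange]
      have hdlen : (firstC s).length = s := by simp [firstC]
      rw [firstC_succ]
      by_cases hcase : s + 1 = m + 1
      · -- r = n : the second block is empty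
        have horb := orbit_head_of_none fuel (m + 1) (s + 1) (firstC s) T
          (by omega) hcase (by simpa using hdlen) (by simpa using hinner)
        obtain rfl : s = m := by omega
        have hshift : cmb ((natRange s).map (· + 1)) (s + 1) = [] := by
          rw [cmb_map, cmb_nil_of_short _ _ (by simp [natRange])]
          rfl
        have hexp : cmb (natRange (s + 1)) (s + 1)
            = (0 :: (firstC s).map (· + 1)) :: T.map (fun x => 0 :: x.map (· + 1)) := by
          rw [natRange_succ_shift s]
          rw [show cmb (0 :: (natRange s).map (· + 1)) (s + 1)
                = (cmb ((natRange s).map (· + 1)) s).map (fun c => 0 :: c)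
                  ++ cmb ((natRange s).map (· + 1)) (s + 1) from rfl]
          rw [hshift, cmb_map, cmb_head s s le_rfl, ← hT]
          simp [Function.comp_def]
        rw [horb, hexp]
        simp only [List.tail_cons]
      · -- r < n : jump to the second block
        have hlt : s + 1 < m + 1 := by omega
        have horb := orbit_head_of_lt fuel (m + 1) (s + 1) (firstC s) T
          (by omega) hlt (by simpa using hdlen) (by simpa using hinner)
        rw [horb]
        have hf2 : m.choose (s + 1) ≤ fuel - T.length - 1 := by omega
        have hout := orbit_shift (fuel - T.length - 1) (m + 1) (s + 1) (firstC (s + 1))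
          (by omega) (by simp [firstC])
        simp only [Nat.add_sub_cancel] at hout
        rw [hout, ih (s + 1) (fuel - T.length - 1) (by omega) hf2]
        have hm1 : cmb (natRange (m + 1)) (s + 1)
            = (0 :: (firstC s).map (· + 1))
                :: (T.map (fun x => 0 :: x.map (· + 1))
                    ++ (cmb (natRange m) (s + 1)).map (List.map (· + 1))) := by
          rw [natRange_succ_shift m]
          rw [show cmb (0 :: (natRange m).map (· + 1)) (s + 1)
                = (cmb ((natRange m).map (· + 1)) s).map (fun c => 0 :: c)
                  ++ cmb ((natRange m).map (· + 1)) (s + 1) from rfl]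
          rw [cmb_map, cmb_map, cmb_head m s hsm, ← hT]
          simp [Function.comp_def]
        have htail : (cmb (natRange m) (s + 1)).map (List.map (· + 1))
            = (firstC (s + 1)).map (· + 1)
                :: ((cmb (natRange m) (s + 1)).tail).map (List.map (· + 1)) := by
          conv_lhs => rw [cmb_head m (s + 1) (by omega)]
          rfl
        rw [hm1]
        simp only [List.tail_cons, htail]

theorem combLoop_eq_orbit (fuel : Nat) (pool c : List Int) (n r : Nat) :
    pvCombLoop fuel pool c n r = (orbit fuel n r c).1.map (pvEmit pool) := by
  induction fuel generalizing c with
  | zero => rfl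
  | succ fuel ih =>
    cases h : pvFindBump c n r with
    | none => simp [pvCombLoop, orbit, nextC, h]
    | some i => simp [pvCombLoop, orbit, nextC, h, ih]

theorem natRange_getD (n k : Nat) (hk : k < n) : (natRange n).getD k 0 = (k : Int) := by
  rw [List.getD_eq_getElem _ _ (by simp [natRange, hk])]
  simp [natRange]

theorem pvEmit_natRange (n : Nat) (c : List Int) (h : ∀ x ∈ c, x ∈ natRange n) :
    pvEmit (natRange n) c = c := by
  unfold pvEmit
  conv_rhs => rw [← List.map_id c]
  apply List.map_congr_left
  intro x hx
  simp only [id]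
  obtain ⟨k, hk, rfl⟩ : ∃ k, k < n ∧ (k : Int) = x := by
    have := h x hx
    simp only [natRange, List.mem_map, List.mem_range] at this
    rcases this with ⟨k, hk, rfl⟩
    exact ⟨k, hk, rfl⟩
  rw [Int.toNat_natCast, natRange_getD n k hk]

theorem combinations_tuple_eq (n r : Nat) :
    combinations_tuple (natRange n) r = cmb (natRange n) r := by
  have hlen : (natRange n).length = n := by simp [natRange]
  rw [show combinations_tuple (natRange n) r
        = (if r > (natRange n).length then []
           else pvEmit (natRange n) ((List.range r).map (fun i : Nat => (i : Int)))
             :: pvCombLoop (2 ^ (natRange n).length) (natRange n)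
                 ((List.range r).map (fun i : Nat => (i : Int))) (natRange n).length r)
      from rfl, hlen]
  by_cases hrn : r > n
  · rw [if_pos hrn]
    exact (cmb_nil_of_short _ _ (by omega)).symm
  · rw [if_neg hrn]
    have hrle : r ≤ n := by omega
    have hfirst : (List.range r).map (fun i : Nat => (i : Int)) = firstC r := rfl
    rw [hfirst, combLoop_eq_orbit,
      orbit_first n r (2 ^ n) hrle (Nat.choose_le_two_pow n r)]
    have hmemF : ∀ x ∈ firstC r, x ∈ natRange n := by
      intro x hx
      simp only [firstC, List.mem_map, List.mem_range] at hx
      obtain ⟨k, hk, rfl⟩ := hx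
      simp only [natRange, List.mem_map, List.mem_range]
      exact ⟨k, by omega, rfl⟩
    have hmap : ((cmb (natRange n) r).tail).map (pvEmit (natRange n))
        = (cmb (natRange n) r).tail := by
      conv_rhs => rw [← List.map_id ((cmb (natRange n) r).tail)]
      apply List.map_congr_left
      intro c hc
      simp only [id]
      exact pvEmit_natRange n c (mem_of_mem_cmb (List.mem_of_mem_tail hc))
    rw [pvEmit_natRange n (firstC r) hmemF, hmap]
    exact (cmb_head n r hrle).symm

theorem conditions_eq (n_nodes : Int) : conditions n_nodes = conditions_alt n_nodes := by
  have hrng : PySem.List.pyRange 0 n_nodes 1 = natRange n_nodes.toNat := by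
    rw [PySem.List.pyRange_one]
    simp [natRange]
  unfold conditions conditions_alt
  rw [hrng]
  simp only [combinations_tuple_eq, pvCombos_eq_cmb,
    PySem.List.foldl_append_eq_flatMap, List.nil_append,
    List.filter_flatMap, List.filter_map, List.map_flatMap]
  refine congrArg₂ List.flatMap (funext fun e => ?_) rfl
  refine congrArg₂ List.flatMap (funext fun i => ?_) rfl
  rw [show ((fun ec : Int × Int × List Int => decide (ec.1 ∉ ec.2.2 ∧ ec.2.1 ∉ ec.2.2))
        ∘ fun z => (e.getD 0 0, e.getD 1 0, z))
      = (fun z => decide (e.getD 0 0 ∉ z ∧ e.getD 1 0 ∉ z)) from funext fun z => rfl]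
  rw [filter_cmb]


-- ===== VERDICT (by name: the statement is the Claim_ definition above) =====
theorem conditions_spec : Claim_equal_conditions := by
  intro n _
  unfold Spec_conditions
  exact conditions_eq n
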